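-- pv_equiv track=rewrite | github.com/thanhtrungnguyen/plant-assistant | backend/src/chat/services/chat_service.py | _extract_plant_info_from_summary
-- ===== SOURCE A (Python) =====
-- from typing import Dict, List, Optional
--
-- def _extract_plant_info_from_summary(summary: str) -> Dict[str, str]:
--     """Extract plant information from a context summary."""
--     if not summary:
--         return {}
--
--     plant_info = {}
--     summary_lower = summary.lower()
--
--     # Try to extract plant name - look for common patterns
--     # This is a simple heuristic - could be improved with NLP
--     plant_keywords = ["fiddle leaf fig", "pothos", "monstera", "snake plant", "succulent",
--                      "peace lily", "rubber plant", "philodendron", "spider plant",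
--                      "aloe", "jade plant", "cactus", "fern"]
--
--     for plant in plant_keywords:
--         if plant in summary_lower:
--             plant_info["name"] = plant.title()
--             break
--
--     # Extract condition/diagnosis information
--     if any(word in summary_lower for word in ["yellowing", "yellow leaves", "brown spots"]):
--         plant_info["condition"] = "Yellowing/browning leaves"
--     elif any(word in summary_lower for word in ["overwater", "root rot"]):
--         plant_info["condition"] = "Overwatering issues"
--     elif any(word in summary_lower for word in ["underwater", "drooping", "wilting"]):
--         plant_info["condition"] = "Underwatering issues"
--     elif "diagnosis" in summary_lower or "identified" in summary_lower:
--         plant_info["condition"] = "Diagnosed for health issues"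
--
--     # Extract diagnosis if available
--     if any(word in summary_lower for word in ["overwatering", "root rot"]):
--         plant_info["diagnosis"] = "Overwatering and potential root rot"
--     elif "underwatering" in summary_lower:
--         plant_info["diagnosis"] = "Underwatering stress"
--     elif any(word in summary_lower for word in ["pest", "spider mites", "aphids"]):
--         plant_info["diagnosis"] = "Pest infestation detected"
--
--     return plant_info
-- ===== SOURCE B (Python) =====
-- # Different algorithm: instead of three ordered first-match scans with break,
-- # compute the matched candidates once from a keyword->targets map, then resolve
-- # each field by MIN priority among its matched candidates (no ordered scan/break).
-- _TARGETS = {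
--     "fiddle leaf fig": (("name", 0, "Fiddle Leaf Fig"),),
--     "pothos": (("name", 1, "Pothos"),),
--     "monstera": (("name", 2, "Monstera"),),
--     "snake plant": (("name", 3, "Snake Plant"),),
--     "succulent": (("name", 4, "Succulent"),),
--     "peace lily": (("name", 5, "Peace Lily"),),
--     "rubber plant": (("name", 6, "Rubber Plant"),),
--     "philodendron": (("name", 7, "Philodendron"),),
--     "spider plant": (("name", 8, "Spider Plant"),),
--     "aloe": (("name", 9, "Aloe"),),
--     "jade plant": (("name", 10, "Jade Plant"),),
--     "cactus": (("name", 11, "Cactus"),),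
--     "fern": (("name", 12, "Fern"),),
--     "yellowing": (("condition", 0, "Yellowing/browning leaves"),),
--     "yellow leaves": (("condition", 0, "Yellowing/browning leaves"),),
--     "brown spots": (("condition", 0, "Yellowing/browning leaves"),),
--     "overwater": (("condition", 1, "Overwatering issues"),),
--     "root rot": (("condition", 1, "Overwatering issues"),
--                  ("diagnosis", 0, "Overwatering and potential root rot")),
--     "underwater": (("condition", 2, "Underwatering issues"),),
--     "drooping": (("condition", 2, "Underwatering issues"),),
--     "wilting": (("condition", 2, "Underwatering issues"),),
--     "diagnosis": (("condition", 3, "Diagnosed for health issues"),),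
--     "identified": (("condition", 3, "Diagnosed for health issues"),),
--     "overwatering": (("diagnosis", 0, "Overwatering and potential root rot"),),
--     "underwatering": (("diagnosis", 1, "Underwatering stress"),),
--     "pest": (("diagnosis", 2, "Pest infestation detected"),),
--     "spider mites": (("diagnosis", 2, "Pest infestation detected"),),
--     "aphids": (("diagnosis", 2, "Pest infestation detected"),),
-- }
--
--
-- def _extract_plant_info_from_summary(summary: str):
--     if not summary:
--         return {}
--     text = summary.lower()
--     candidates = [t for kw, ts in _TARGETS.items() if kw in text for t in ts]
--     result = {}
--     for field in ("name", "condition", "diagnosis"):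
--         hits = [(p, v) for f, p, v in candidates if f == field]
--         if hits:
--             result[field] = min(hits, key=lambda h: h[0])[1]
--     return result
-- ===== Notes on version B (the rewrite author's own statement) =====
-- stated objective: alternative
-- what changed: Instead of three ordered first-match if/elif scans with break, B builds the set of matched keyword candidates once from a keyword->(field,priority,value) map and resolves each field as the minimum-priority matched candidate.
import Mathlib
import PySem

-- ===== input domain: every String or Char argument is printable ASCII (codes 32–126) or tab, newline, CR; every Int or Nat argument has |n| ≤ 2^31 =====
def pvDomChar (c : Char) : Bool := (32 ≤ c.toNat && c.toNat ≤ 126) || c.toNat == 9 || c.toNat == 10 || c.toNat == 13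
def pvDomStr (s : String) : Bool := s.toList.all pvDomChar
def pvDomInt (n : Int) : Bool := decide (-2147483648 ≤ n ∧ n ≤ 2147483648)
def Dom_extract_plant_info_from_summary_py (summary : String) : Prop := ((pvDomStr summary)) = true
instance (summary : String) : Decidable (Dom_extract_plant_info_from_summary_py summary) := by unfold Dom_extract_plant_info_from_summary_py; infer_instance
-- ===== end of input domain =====

-- B replaces A's three ordered first-match if/elif scans (with break) by one pass
-- collecting all matched (field, priority, value) candidates from a keyword map,
-- each field then resolved as its minimum-priority matched candidate (objective: alternative; same cost).

-- ===== PORT A =====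

-- str.title(), exact on ASCII (on printable ASCII the cased characters are exactly the letters)
def pyIsAlpha (c : Char) : Bool := ('a' ≤ c && c ≤ 'z') || ('A' ≤ c && c ≤ 'Z')
def pyUpChar (c : Char) : Char := if 'a' ≤ c && c ≤ 'z' then Char.ofNat (c.toNat - 32) else c
def pyDownChar (c : Char) : Char := if 'A' ≤ c && c ≤ 'Z' then Char.ofNat (c.toNat + 32) else c
def pyTitleAux : List Char → Bool → List Char
  | [], _ => []
  | c :: rest, prevAlpha =>
      (if prevAlpha then pyDownChar c else pyUpChar c) :: pyTitleAux rest (pyIsAlpha c)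
def pyTitle (s : String) : String := String.ofList (pyTitleAux s.toList false)

def plantKeywords : List String :=
  ["fiddle leaf fig", "pothos", "monstera", "snake plant", "succulent",
   "peace lily", "rubber plant", "philodendron", "spider plant",
   "aloe", "jade plant", "cactus", "fern"]

-- the 'for plant in plant_keywords: … break' loop
def aNameLoop : List String → String → PySem.Dict String String → PySem.Dict String String
  | [], _, d => d
  | p :: rest, sl, d =>
      if PySem.Str.isIn p sl then d.insert "name" (pyTitle p) else aNameLoop rest sl d

-- the condition if/elif block
def aCondStep (d : PySem.Dict String String) (sl : String) : PySem.Dict String String :=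
  if (["yellowing", "yellow leaves", "brown spots"] : List String).any (fun w => PySem.Str.isIn w sl) then
    d.insert "condition" "Yellowing/browning leaves"
  else if (["overwater", "root rot"] : List String).any (fun w => PySem.Str.isIn w sl) then
    d.insert "condition" "Overwatering issues"
  else if (["underwater", "drooping", "wilting"] : List String).any (fun w => PySem.Str.isIn w sl) then
    d.insert "condition" "Underwatering issues"
  else if PySem.Str.isIn "diagnosis" sl || PySem.Str.isIn "identified" sl then
    d.insert "condition" "Diagnosed for health issues"
  else d

-- the diagnosis if/elif block
def aDiagStep (d : PySem.Dict String String) (sl : String) : PySem.Dict String String :=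
  if (["overwatering", "root rot"] : List String).any (fun w => PySem.Str.isIn w sl) then
    d.insert "diagnosis" "Overwatering and potential root rot"
  else if PySem.Str.isIn "underwatering" sl then
    d.insert "diagnosis" "Underwatering stress"
  else if (["pest", "spider mites", "aphids"] : List String).any (fun w => PySem.Str.isIn w sl) then
    d.insert "diagnosis" "Pest infestation detected"
  else d

def extract_plant_info_from_summary_py (summary : String) : List (String × String) :=
  if summary = "" then [] else
  (aDiagStep
    (aCondStep
      (aNameLoop plantKeywords (PySem.Str.lower summary) PySem.Dict.empty)
      (PySem.Str.lower summary))
    (PySem.Str.lower summary)).items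

-- ===== PORT B =====

-- the module-level keyword -> targets dict, in insertion order
def bTargets : List (String × List (String × Int × String)) :=
  [("fiddle leaf fig", [("name", 0, "Fiddle Leaf Fig")]),
   ("pothos", [("name", 1, "Pothos")]),
   ("monstera", [("name", 2, "Monstera")]),
   ("snake plant", [("name", 3, "Snake Plant")]),
   ("succulent", [("name", 4, "Succulent")]),
   ("peace lily", [("name", 5, "Peace Lily")]),
   ("rubber plant", [("name", 6, "Rubber Plant")]),
   ("philodendron", [("name", 7, "Philodendron")]),
   ("spider plant", [("name", 8, "Spider Plant")]),
   ("aloe", [("name", 9, "Aloe")]),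
   ("jade plant", [("name", 10, "Jade Plant")]),
   ("cactus", [("name", 11, "Cactus")]),
   ("fern", [("name", 12, "Fern")]),
   ("yellowing", [("condition", 0, "Yellowing/browning leaves")]),
   ("yellow leaves", [("condition", 0, "Yellowing/browning leaves")]),
   ("brown spots", [("condition", 0, "Yellowing/browning leaves")]),
   ("overwater", [("condition", 1, "Overwatering issues")]),
   ("root rot", [("condition", 1, "Overwatering issues"),
                 ("diagnosis", 0, "Overwatering and potential root rot")]),
   ("underwater", [("condition", 2, "Underwatering issues")]),
   ("drooping", [("condition", 2, "Underwatering issues")]),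
   ("wilting", [("condition", 2, "Underwatering issues")]),
   ("diagnosis", [("condition", 3, "Diagnosed for health issues")]),
   ("identified", [("condition", 3, "Diagnosed for health issues")]),
   ("overwatering", [("diagnosis", 0, "Overwatering and potential root rot")]),
   ("underwatering", [("diagnosis", 1, "Underwatering stress")]),
   ("pest", [("diagnosis", 2, "Pest infestation detected")]),
   ("spider mites", [("diagnosis", 2, "Pest infestation detected")]),
   ("aphids", [("diagnosis", 2, "Pest infestation detected")])]

-- loop body: hits = [(p,v) for f,p,v in candidates if f == field]; if hits: result[field] = min(hits, key=…)[1]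
def bField (candidates : List (String × Int × String)) (r : PySem.Dict String String)
    (f : String) : PySem.Dict String String :=
  let hits := (candidates.filter (fun c => c.1 == f)).map (fun c => (c.2.1, c.2.2))
  match PySem.List.min? hits (fun h => h.1) with
  | some m => r.insert f m.2
  | none => r

def extract_plant_info_from_summary_py_alt (summary : String) : List (String × String) :=
  if summary = "" then [] else
  ((["name", "condition", "diagnosis"] : List String).foldl
    (bField ((bTargets.filter
        (fun kt => PySem.Str.isIn kt.1 (PySem.Str.lower summary))).flatMap (fun kt => kt.2)))
    PySem.Dict.empty).items

-- ===== PRECONDITION & SPEC =====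
def Spec_extract_plant_info_from_summary_py (summary : String) (out : List (String × String)) : Prop := out = extract_plant_info_from_summary_py_alt summary
instance (summary : String) (out : List (String × String)) : Decidable (Spec_extract_plant_info_from_summary_py summary out) := by unfold Spec_extract_plant_info_from_summary_py; infer_instance

-- ===== CLAIM (what is proved, stated in full; the proofs are below) =====
def Claim_equal_extract_plant_info_from_summary_py : Prop := ∀ (summary : String), Dom_extract_plant_info_from_summary_py summary → Spec_extract_plant_info_from_summary_py summary (extract_plant_info_from_summary_py summary)

-- ===== LEMMAS AND PROOFS =====

-- grouped rule view shared by both reductions: first rule whose any-keyword matches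
def findVal (rules : List (List String × String)) (sl : String) : Option String :=
  (rules.find? (fun r => r.1.any (fun k => PySem.Str.isIn k sl))).map (fun r => r.2)

def dStep (d : PySem.Dict String String) (f : String) : Option String → PySem.Dict String String
  | some v => d.insert f v
  | none => d

def nameRules : List (List String × String) := plantKeywords.map (fun p => ([p], pyTitle p))

def condRules : List (List String × String) :=
  [(["yellowing", "yellow leaves", "brown spots"], "Yellowing/browning leaves"),
   (["overwater", "root rot"], "Overwatering issues"),
   (["underwater", "drooping", "wilting"], "Underwatering issues"),
   (["diagnosis", "identified"], "Diagnosed for health issues")]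

def diagRules : List (List String × String) :=
  [(["overwatering", "root rot"], "Overwatering and potential root rot"),
   (["underwatering"], "Underwatering stress"),
   (["pest", "spider mites", "aphids"], "Pest infestation detected")]

-- diagnosis grouped rules in keyword-map order ("root rot" appears before "overwatering"
-- in bTargets); findVal over them equals findVal over diagRules since rule 1's any-test is symmetric
def diagRulesB : List (List String × String) :=
  [(["root rot", "overwatering"], "Overwatering and potential root rot"),
   (["underwatering"], "Underwatering stress"),
   (["pest", "spider mites", "aphids"], "Pest infestation detected")]

theorem findVal_nil (sl : String) : findVal [] sl = none := rfl

theorem findVal_cons_pos (ks : List String) (v : String) (rs : List (List String × String))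
    (sl : String) (h : ks.any (fun k => PySem.Str.isIn k sl) = true) :
    findVal ((ks, v) :: rs) sl = some v := by
  unfold findVal
  rw [List.find?_cons_of_pos (p := fun r : List String × String => r.1.any fun k => PySem.Str.isIn k sl)
    (a := (ks, v)) (l := rs) h]
  rfl

theorem findVal_cons_neg (ks : List String) (v : String) (rs : List (List String × String))
    (sl : String) (h : ks.any (fun k => PySem.Str.isIn k sl) = false) :
    findVal ((ks, v) :: rs) sl = findVal rs sl := by
  unfold findVal
  rw [List.find?_cons_of_neg (p := fun r : List String × String => r.1.any fun k => PySem.Str.isIn k sl)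
    (a := (ks, v)) (l := rs) (fun hc => Bool.false_ne_true (h.symm.trans hc))]

theorem findVal_diagB (sl : String) : findVal diagRulesB sl = findVal diagRules sl := by
  unfold diagRulesB diagRules
  cases h1 : PySem.Str.isIn "root rot" sl <;>
    cases h2 : PySem.Str.isIn "overwatering" sl <;>
      simp only [findVal_cons_pos, findVal_cons_neg, List.any_cons, List.any_nil,
        Bool.or_false, Bool.or_true, h1, h2]

-- ---- A-side reductions to findVal ----

theorem aNameLoop_eq (ps : List String) (sl : String) (d : PySem.Dict String String) :
    aNameLoop ps sl d = dStep d "name" (findVal (ps.map (fun p => ([p], pyTitle p))) sl) := by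
  induction ps with
  | nil => rfl
  | cons p rest ih =>
      cases h : PySem.Str.isIn p sl with
      | true =>
          have hp : (([p] : List String).any (fun k => PySem.Str.isIn k sl)) = true := by
            simp only [List.any_cons, List.any_nil, Bool.or_false, h]
          rw [List.map_cons, findVal_cons_pos _ _ _ _ hp]
          simp only [aNameLoop, h, if_true, dStep]
      | false =>
          have hp : (([p] : List String).any (fun k => PySem.Str.isIn k sl)) = false := by
            simp only [List.any_cons, List.any_nil, Bool.or_false, h]
          rw [List.map_cons, findVal_cons_neg _ _ _ _ hp]
          simp only [aNameLoop, h, Bool.false_eq_true, if_false]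
          exact ih

theorem aCondStep_eq (d : PySem.Dict String String) (sl : String) :
    aCondStep d sl = dStep d "condition" (findVal condRules sl) := by
  unfold aCondStep condRules
  cases h1 : (["yellowing", "yellow leaves", "brown spots"] : List String).any (fun w => PySem.Str.isIn w sl) <;>
  cases h2 : (["overwater", "root rot"] : List String).any (fun w => PySem.Str.isIn w sl) <;>
  cases h3 : (["underwater", "drooping", "wilting"] : List String).any (fun w => PySem.Str.isIn w sl) <;>
  cases h4 : (PySem.Str.isIn "diagnosis" sl || PySem.Str.isIn "identified" sl) <;>
    simp only [h1, h2, h3, h4, if_true, Bool.false_eq_true, if_false] <;>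
    simp only [List.any_cons, List.any_nil, Bool.or_false] at h1 h2 h3 <;>
    simp only [findVal_nil, findVal_cons_pos, findVal_cons_neg, List.any_cons, List.any_nil,
      Bool.or_false, h1, h2, h3, h4, dStep]

theorem aDiagStep_eq (d : PySem.Dict String String) (sl : String) :
    aDiagStep d sl = dStep d "diagnosis" (findVal diagRules sl) := by
  unfold aDiagStep diagRules
  cases h1 : (["overwatering", "root rot"] : List String).any (fun w => PySem.Str.isIn w sl) <;>
  cases h2 : PySem.Str.isIn "underwatering" sl <;>
  cases h3 : (["pest", "spider mites", "aphids"] : List String).any (fun w => PySem.Str.isIn w sl) <;>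
    simp only [h1, h2, h3, if_true, Bool.false_eq_true, if_false] <;>
    simp only [List.any_cons, List.any_nil, Bool.or_false] at h1 h3 <;>
    simp only [findVal_nil, findVal_cons_pos, findVal_cons_neg, List.any_cons, List.any_nil,
      Bool.or_false, h1, h2, h3, dStep]

-- ---- B-side reductions ----

-- flatten the keyword map to (keyword, target) pairs
def pairAll : List (String × (String × Int × String)) :=
  bTargets.flatMap (fun kt => kt.2.map (fun t => (kt.1, t)))

-- candidates of the filtered map = the flat pair list filtered by keyword match
theorem flat_filter_comm (tbl : List (String × List (String × Int × String))) (p : String → Bool) :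
    (tbl.filter (fun kt => p kt.1)).flatMap (fun kt => kt.2) =
      ((tbl.flatMap (fun kt => kt.2.map (fun t => (kt.1, t)))).filter (fun e => p e.1)).map
        (fun e => e.2) := by
  induction tbl with
  | nil => rfl
  | cons kt rest ih =>
      cases h : p kt.1 <;>
        simp [h, List.filter_map, Function.comp_def, ih]

-- grouped rules flattened to prioritized (keyword, (field, prio, value)) entries
def flatPairs (f : String) : List (List String × String) → Int → List (String × (String × Int × String))
  | [], _ => []
  | (ks, v) :: rs, i => ks.map (fun k => (k, f, i, v)) ++ flatPairs f rs (i + 1)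

theorem flatPairs_prio_ge (f : String) (rules : List (List String × String)) (i : Int) :
    ∀ e ∈ flatPairs f rules i, i ≤ e.2.2.1 := by
  induction rules generalizing i with
  | nil => simp [flatPairs]
  | cons r rs ih =>
      obtain ⟨ks, v⟩ := r
      intro e he
      rcases List.mem_append.mp he with h | h
      · obtain ⟨k, _, rfl⟩ := List.mem_map.mp h
        exact le_refl i
      · exact le_trans (by omega) (ih (i + 1) e h)

-- CORE: min-priority over the matched flattened entries = first matching grouped rule
theorem min_flat_eq_findVal (f sl : String) (rules : List (List String × String)) (i : Int) :
    (PySem.List.min?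
        (((flatPairs f rules i).filter (fun e => PySem.Str.isIn e.1 sl)).map
          (fun e => (e.2.2.1, e.2.2.2)))
        (fun h => h.1)).map (fun h => h.2) = findVal rules sl := by
  induction rules generalizing i with
  | nil => rfl
  | cons r rs ih =>
      obtain ⟨ks, v⟩ := r
      have hsplit :
          ((flatPairs f ((ks, v) :: rs) i).filter (fun e => PySem.Str.isIn e.1 sl)).map
              (fun e => (e.2.2.1, e.2.2.2)) =
            (ks.filter (fun k => PySem.Str.isIn k sl)).map (fun _ => ((i : Int), v)) ++
              ((flatPairs f rs (i + 1)).filter (fun e => PySem.Str.isIn e.1 sl)).map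
                (fun e => (e.2.2.1, e.2.2.2)) := by
        simp [flatPairs, List.filter_append, List.filter_map, Function.comp_def]
      by_cases hb : ks.any (fun k => PySem.Str.isIn k sl) = true
      · -- head rule matches: the minimum is (i, v)
        obtain ⟨k, hk, hkin⟩ := List.any_eq_true.mp hb
        have hmem : ((i : Int), v) ∈
            ((flatPairs f ((ks, v) :: rs) i).filter (fun e => PySem.Str.isIn e.1 sl)).map
              (fun e => (e.2.2.1, e.2.2.2)) := by
          rw [hsplit]
          exact List.mem_append_left _ (List.mem_map.mpr
            ⟨k, List.mem_filter.mpr ⟨hk, hkin⟩, rfl⟩)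
        cases hmin : PySem.List.min?
            (((flatPairs f ((ks, v) :: rs) i).filter (fun e => PySem.Str.isIn e.1 sl)).map
              (fun e => (e.2.2.1, e.2.2.2))) (fun h => h.1) with
        | none =>
            rw [PySem.List.min?_eq_none_iff] at hmin
            rw [hmin] at hmem; cases hmem
        | some m =>
            have hm_mem := PySem.List.min?_mem hmin
            have hm_le := PySem.List.min?_isMin hmin _ hmem
            have hm2 : m.2 = v := by
              rw [hsplit] at hm_mem
              rcases List.mem_append.mp hm_mem with h | h
              · obtain ⟨_, _, rfl⟩ := List.mem_map.mp h; rfl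
              · exfalso
                obtain ⟨e, he, rfl⟩ := List.mem_map.mp h
                have := flatPairs_prio_ge f rs (i + 1) e (List.mem_filter.mp he).1
                simp only at hm_le
                omega
            rw [Option.map_some, hm2, findVal_cons_pos _ _ _ _ hb]
      · -- head rule does not match: its entries are filtered out
        simp only [Bool.not_eq_true] at hb
        have hnil : ks.filter (fun k => PySem.Str.isIn k sl) = [] := by
          rw [List.filter_eq_nil_iff]
          intro k hk
          rw [Bool.not_eq_true]
          cases hc : PySem.Str.isIn k sl
          · rfl
          · exact absurd (List.any_eq_true.mpr ⟨k, hk, hc⟩)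
              (by rw [hb]; exact Bool.false_ne_true)
        rw [hsplit, hnil, List.map_nil, List.nil_append, ih (i + 1),
          findVal_cons_neg _ _ _ _ hb]

-- the per-field filters of the flat pair list are literal computations
theorem pairAll_name : pairAll.filter (fun e => e.2.1 == "name") = flatPairs "name" nameRules 0 := by
  decide
theorem pairAll_cond : pairAll.filter (fun e => e.2.1 == "condition") = flatPairs "condition" condRules 0 := by
  decide
theorem pairAll_diag : pairAll.filter (fun e => e.2.1 == "diagnosis") = flatPairs "diagnosis" diagRulesB 0 := by
  decide

-- bField computes dStep of the grouped-rule first match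
theorem bField_eq (sl : String) (r : PySem.Dict String String) (f : String)
    (rules : List (List String × String))
    (hf : pairAll.filter (fun e => e.2.1 == f) = flatPairs f rules 0) :
    bField ((bTargets.filter (fun kt => PySem.Str.isIn kt.1 sl)).flatMap (fun kt => kt.2)) r f =
      dStep r f (findVal rules sl) := by
  have h1 : ((bTargets.filter (fun kt => PySem.Str.isIn kt.1 sl)).flatMap (fun kt => kt.2)) =
      (pairAll.filter (fun e => PySem.Str.isIn e.1 sl)).map (fun e => e.2) :=
    flat_filter_comm bTargets (fun s => PySem.Str.isIn s sl)
  have h2 : (pairAll.filter (fun e => PySem.Str.isIn e.1 sl)).filter (fun e => e.2.1 == f) =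
      (flatPairs f rules 0).filter (fun e => PySem.Str.isIn e.1 sl) := by
    rw [← hf, List.filter_filter, List.filter_filter]
    exact List.filter_congr (fun e _ => by rw [Bool.and_comm])
  have hc : ((bTargets.filter (fun kt => PySem.Str.isIn kt.1 sl)).flatMap (fun kt => kt.2)).filter
        (fun c => c.1 == f) =
      ((flatPairs f rules 0).filter (fun e => PySem.Str.isIn e.1 sl)).map (fun e => e.2) := by
    rw [h1, List.filter_map]
    simp only [Function.comp_def]
    rw [h2]
  simp only [bField, hc, List.map_map, Function.comp_def]
  rw [← min_flat_eq_findVal f sl rules 0]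
  cases PySem.List.min? (((flatPairs f rules 0).filter (fun e => PySem.Str.isIn e.1 sl)).map
      (fun e => (e.2.2.1, e.2.2.2))) (fun h => h.1) <;> rfl

-- ===== VERDICT (by name: the statement is the Claim_ definition above) =====
theorem extract_plant_info_from_summary_py_spec : Claim_equal_extract_plant_info_from_summary_py := by
  intro summary _
  unfold Spec_extract_plant_info_from_summary_py
  unfold extract_plant_info_from_summary_py extract_plant_info_from_summary_py_alt
  by_cases h : summary = ""
  · rw [if_pos h, if_pos h]
  · rw [if_neg h, if_neg h]
    simp only [List.foldl_cons, List.foldl_nil]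
    rw [bField_eq _ _ _ nameRules pairAll_name,
        bField_eq _ _ _ condRules pairAll_cond,
        bField_eq _ _ _ diagRulesB pairAll_diag, findVal_diagB,
        aNameLoop_eq, aCondStep_eq, aDiagStep_eq]
    rfl
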